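-- pv_equiv track=rewrite | github.com/Brick-Briceno/SBR | sbr_parser.py | split_without_group
-- ===== SOURCE A (Python) =====
-- def split_without_group(code: str, split: str = ",") -> list[str]:
--     "Split code by delimiter while respecting {} groups"
--     level_key = 0
--     brick = ""
--     result = []
--     for char in code + ",":
--         # Everything inside {} is treated as single argument
--         if char == "{":
--             level_key += 1
--         elif char == "}":
--             level_key -= 1
--
--         if char == split and not level_key:
--             result.append(brick)
--             brick = ""
--         else:
--             brick += char
--
--     return result
-- ===== SOURCE B (Python) =====
-- def split_without_group(code: str, split: str = ","):
--     "Split code by delimiter while respecting {} groups (two-pass: find cut indices, then slice)"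
--     s = code + ","
--     depth = 0
--     cuts = []
--     for i, ch in enumerate(s):
--         if ch == "{":
--             depth += 1
--         elif ch == "}":
--             depth -= 1
--         if ch == split and depth == 0:
--             cuts.append(i)
--     out = []
--     start = 0
--     for i in cuts:
--         out.append(s[start:i])
--         start = i + 1
--     return out
-- ===== Notes on version B (the rewrite author's own statement) =====
-- stated objective: alternative
-- what changed: Replaces the single accumulate-and-flush loop over characters with a two-pass index algorithm: first collect the positions of depth-0 delimiters, then emit the slices between consecutive cut positions (no accumulator string, no trailing flush).
import Mathlib
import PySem

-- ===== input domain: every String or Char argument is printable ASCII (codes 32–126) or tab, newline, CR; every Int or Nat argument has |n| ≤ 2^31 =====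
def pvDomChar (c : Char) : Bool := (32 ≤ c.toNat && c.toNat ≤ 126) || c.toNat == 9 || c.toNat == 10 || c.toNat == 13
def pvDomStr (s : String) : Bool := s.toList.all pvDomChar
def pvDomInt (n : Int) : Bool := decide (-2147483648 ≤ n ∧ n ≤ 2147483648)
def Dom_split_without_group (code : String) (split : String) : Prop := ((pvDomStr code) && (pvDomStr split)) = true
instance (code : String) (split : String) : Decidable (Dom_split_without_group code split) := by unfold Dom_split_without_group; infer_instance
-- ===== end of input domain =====

-- B replaces A's accumulate-and-flush loop with a two-pass scheme (collect depth-0 delimiter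
-- indices, then slice between them); same behaviour, different decomposition (no speed claim).


-- ===== PORT A =====
-- A's loop: state (level_key, brick, result); depth updated before the flush test,
-- 'not level_key' is 'level_key = 0'; brick kept as List Char, flushed as String.
def pvLoopA (split : String) : List Char → Int → List Char → List String → List String
  | [], _, _, res => res
  | c :: cs, lvl, brick, res =>
    let lvl' : Int := if c = '{' then lvl + 1 else if c = '}' then lvl - 1 else lvl
    if String.mk [c] = split ∧ lvl' = 0 then
      pvLoopA split cs lvl' [] (res ++ [String.mk brick])
    else
      pvLoopA split cs lvl' (brick ++ [c]) res

def split_without_group (code : String) (split : String) : List String :=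
  pvLoopA split (code.toList ++ [',']) 0 [] []

-- ===== PORT B =====
-- first pass of Source B: running depth, collect indices of depth-0 delimiter characters
def pvCuts (split : String) : List Char → Int → Nat → List Nat
  | [], _, _ => []
  | c :: cs, depth, i =>
    let depth' : Int := if c = '{' then depth + 1 else if c = '}' then depth - 1 else depth
    if String.mk [c] = split ∧ depth' = 0 then i :: pvCuts split cs depth' (i + 1)
    else pvCuts split cs depth' (i + 1)

-- second pass of Source B: emit s[start:i] for each cut i, start := i+1
def pvEmit (s : List Char) : List Nat → Nat → List String
  | [], _ => []
  | i :: is, start => String.mk ((s.drop start).take (i - start)) :: pvEmit s is (i + 1)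

def split_without_group_alt (code : String) (split : String) : List String :=
  let s := code.toList ++ [',']
  pvEmit s (pvCuts split s 0 0) 0

-- ===== PRECONDITION & SPEC =====
def Spec_split_without_group (code : String) (split : String) (out : List String) : Prop := out = split_without_group_alt code split
instance (code : String) (split : String) (out : List String) : Decidable (Spec_split_without_group code split out) := by unfold Spec_split_without_group; infer_instance

-- ===== CLAIM (what is proved, stated in full; the proofs are below) =====
def Claim_equal_split_without_group : Prop := ∀ (code : String) (split : String), Dom_split_without_group code split → Spec_split_without_group code split (split_without_group code split)

-- ===== LEMMAS AND PROOFS =====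
-- Invariant: at position p of the full list s (with cs = s.drop p), A's brick is exactly
-- the pending slice s[start:p]; then A's loop equals res ++ the slices B emits from there.
theorem pvLoopA_eq (split : String) :
    ∀ (cs : List Char) (lvl : Int) (brick : List Char) (res : List String)
      (s : List Char) (p start : Nat),
      s.drop p = cs → start + brick.length = p →
      (s.drop start).take (p - start) = brick →
      pvLoopA split cs lvl brick res =
        res ++ pvEmit s (pvCuts split cs lvl p) start := by
  intro cs
  induction cs with
  | nil => intro lvl brick res s p start _ _ _; simp [pvLoopA, pvCuts, pvEmit]
  | cons c cs ih =>
    intro lvl brick res s p start hdrop hlen htake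
    have hdrop' : s.drop (p + 1) = cs := by
      have := congrArg (List.drop 1) hdrop
      simpa [List.drop_drop, Nat.add_comm] using this
    simp only [pvLoopA, pvCuts]
    set lvl' : Int := if c = '{' then lvl + 1 else if c = '}' then lvl - 1 else lvl with hlvl'
    by_cases hc : String.mk [c] = split ∧ lvl' = 0
    · simp only [if_pos hc]
      rw [ih lvl' [] (res ++ [String.mk brick]) s (p + 1) (p + 1) hdrop' (by simp) (by simp)]
      have hps : p - start = brick.length := by omega
      rw [hps] at htake
      simp [pvEmit, hps, htake, List.append_assoc]
    · simp only [if_neg hc]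
      have hget : (s.drop start)[p - start]? = some c := by
        have h0 : s[p]? = some c := by
          have := congrArg (fun l => l[0]?) hdrop
          simpa [List.getElem?_drop] using this
        rw [List.getElem?_drop]
        have hps : start + (p - start) = p := by omega
        rw [hps, h0]
      have htake' : (s.drop start).take (p + 1 - start) = brick ++ [c] := by
        have h1 : p + 1 - start = (p - start) + 1 := by omega
        rw [h1, List.take_add_one, htake, hget]
        simp
      rw [ih lvl' (brick ++ [c]) res s (p + 1) start hdrop' (by simp; omega) htake']

-- ===== VERDICT (by name: the statement is the Claim_ definition above) =====
theorem split_without_group_spec : Claim_equal_split_without_group := by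
  intro code split _
  show split_without_group code split = split_without_group_alt code split
  unfold split_without_group split_without_group_alt
  simpa using pvLoopA_eq split (code.toList ++ [',']) 0 [] [] (code.toList ++ [',']) 0 0
    rfl rfl rfl
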